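-- pv_equiv track=rewrite | github.com/QGarot/habbo-font | src/letters_data.py | get_letter_index
-- ===== SOURCE A (Python) =====
-- data = [('a', 30), ('b', 30), ('c', 30), ('d', 30), ('e', 30), ('f', 30), ('g', 30), ('h', 30), ('i', 20), ('j', 28),
--         ('k', 30), ('l', 28), ('m', 40), ('n', 30), ('o', 30), ('p', 30), ('q', 30), ('r', 30), ('s', 30), ('t', 30),
--         ('u', 30), ('v', 30), ('w', 40), ('x', 30), ('y', 30), ('z', 30)]
--
-- def get_letter_index(x: str) -> int:
--     i = 0
--     if len(x) == 1:
--         for letter, _ in data: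
--             if letter == x:
--                 return i
--             else:
--                 i = i + 1
-- ===== SOURCE B (Python) =====
-- def get_letter_index(x: str) -> int:
--     if len(x) == 1 and 'a' <= x <= 'z':
--         return ord(x) - ord('a')
-- ===== Notes on version B (the rewrite author's own statement) =====
-- stated objective: idiomatic
-- what changed: Replaces the linear scan over the fixed a-z table with a closed-form arithmetic index computed from the character code, guarded by a lowercase range check.
import Mathlib
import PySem

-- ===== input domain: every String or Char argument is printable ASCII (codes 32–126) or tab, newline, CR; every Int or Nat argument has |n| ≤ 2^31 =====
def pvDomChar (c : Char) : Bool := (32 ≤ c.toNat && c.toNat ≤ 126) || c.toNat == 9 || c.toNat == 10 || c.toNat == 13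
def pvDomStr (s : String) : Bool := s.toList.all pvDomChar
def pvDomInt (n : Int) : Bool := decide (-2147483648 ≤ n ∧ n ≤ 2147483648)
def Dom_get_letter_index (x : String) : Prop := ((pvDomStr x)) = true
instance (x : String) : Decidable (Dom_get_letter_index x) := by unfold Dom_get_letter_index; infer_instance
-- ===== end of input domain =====

-- B replaces A's linear scan of the fixed a–z table with the closed form ord(x) - ord('a') (idiomatic).


-- ===== PORT A =====
-- the module-level `data` table
def pvData : List (String × Int) :=
  [("a", 30), ("b", 30), ("c", 30), ("d", 30), ("e", 30), ("f", 30), ("g", 30), ("h", 30), ("i", 20), ("j", 28),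
   ("k", 30), ("l", 28), ("m", 40), ("n", 30), ("o", 30), ("p", 30), ("q", 30), ("r", 30), ("s", 30), ("t", 30),
   ("u", 30), ("v", 30), ("w", 40), ("x", 30), ("y", 30), ("z", 30)]

-- the `for letter, _ in data` loop with the running counter i; falling off the loop returns None
def pvScanA : List (String × Int) → Int → String → Option Int
  | [], _, _ => none
  | (letter, _) :: rest, i, x => if letter = x then some i else pvScanA rest (i + 1) x

def get_letter_index (x : String) : Option Int :=
  if PySem.Str.len x = 1 then pvScanA pvData 0 x else none

-- ===== PORT B =====
-- Source B: if len(x) == 1 and 'a' <= x <= 'z': return ord(x) - ord('a')  (for a 1-char string the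
-- string comparison is the character comparison, and ord is Char.toNat)
def get_letter_index_alt (x : String) : Option Int :=
  match x.toList with
  | [c] => if 'a' ≤ c ∧ c ≤ 'z' then some ((c.toNat : Int) - 97) else none
  | _ => none

-- ===== PRECONDITION & SPEC =====
def Spec_get_letter_index (x : String) (out : Option Int) : Prop := out = get_letter_index_alt x
instance (x : String) (out : Option Int) : Decidable (Spec_get_letter_index x out) := by unfold Spec_get_letter_index; infer_instance

-- ===== CLAIM (what is proved, stated in full; the proofs are below) =====
def Claim_equal_get_letter_index : Prop := ∀ (x : String), Dom_get_letter_index x → Spec_get_letter_index x (get_letter_index x)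

-- ===== LEMMAS AND PROOFS =====

-- the scan over the literal table, evaluated against a one-character string
-- the scan over the literal table, evaluated against a one-character string
theorem pvScanA_single (c : Char) (x : String) (hx : x.toList = [c]) :
    pvScanA pvData 0 x = (if 'a' ≤ c ∧ c ≤ 'z' then some ((c.toNat : Int) - 97) else none) := by
  by_cases hc0 : c = 'a'
  · subst hc0
    have hxe : "a" = x := String.toList_inj.mp (by rw [hx]; decide)
    subst hxe
    decide
  by_cases hc1 : c = 'b'
  · subst hc1
    have hxe : "b" = x := String.toList_inj.mp (by rw [hx]; decide)
    subst hxe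
    decide
  by_cases hc2 : c = 'c'
  · subst hc2
    have hxe : "c" = x := String.toList_inj.mp (by rw [hx]; decide)
    subst hxe
    decide
  by_cases hc3 : c = 'd'
  · subst hc3
    have hxe : "d" = x := String.toList_inj.mp (by rw [hx]; decide)
    subst hxe
    decide
  by_cases hc4 : c = 'e'
  · subst hc4
    have hxe : "e" = x := String.toList_inj.mp (by rw [hx]; decide)
    subst hxe
    decide
  by_cases hc5 : c = 'f'
  · subst hc5
    have hxe : "f" = x := String.toList_inj.mp (by rw [hx]; decide)
    subst hxe
    decide
  by_cases hc6 : c = 'g'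
  · subst hc6
    have hxe : "g" = x := String.toList_inj.mp (by rw [hx]; decide)
    subst hxe
    decide
  by_cases hc7 : c = 'h'
  · subst hc7
    have hxe : "h" = x := String.toList_inj.mp (by rw [hx]; decide)
    subst hxe
    decide
  by_cases hc8 : c = 'i'
  · subst hc8
    have hxe : "i" = x := String.toList_inj.mp (by rw [hx]; decide)
    subst hxe
    decide
  by_cases hc9 : c = 'j'
  · subst hc9
    have hxe : "j" = x := String.toList_inj.mp (by rw [hx]; decide)
    subst hxe
    decide
  by_cases hc10 : c = 'k'
  · subst hc10
    have hxe : "k" = x := String.toList_inj.mp (by rw [hx]; decide)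
    subst hxe
    decide
  by_cases hc11 : c = 'l'
  · subst hc11
    have hxe : "l" = x := String.toList_inj.mp (by rw [hx]; decide)
    subst hxe
    decide
  by_cases hc12 : c = 'm'
  · subst hc12
    have hxe : "m" = x := String.toList_inj.mp (by rw [hx]; decide)
    subst hxe
    decide
  by_cases hc13 : c = 'n'
  · subst hc13
    have hxe : "n" = x := String.toList_inj.mp (by rw [hx]; decide)
    subst hxe
    decide
  by_cases hc14 : c = 'o'
  · subst hc14
    have hxe : "o" = x := String.toList_inj.mp (by rw [hx]; decide)
    subst hxe
    decide
  by_cases hc15 : c = 'p'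
  · subst hc15
    have hxe : "p" = x := String.toList_inj.mp (by rw [hx]; decide)
    subst hxe
    decide
  by_cases hc16 : c = 'q'
  · subst hc16
    have hxe : "q" = x := String.toList_inj.mp (by rw [hx]; decide)
    subst hxe
    decide
  by_cases hc17 : c = 'r'
  · subst hc17
    have hxe : "r" = x := String.toList_inj.mp (by rw [hx]; decide)
    subst hxe
    decide
  by_cases hc18 : c = 's'
  · subst hc18
    have hxe : "s" = x := String.toList_inj.mp (by rw [hx]; decide)
    subst hxe
    decide
  by_cases hc19 : c = 't'
  · subst hc19
    have hxe : "t" = x := String.toList_inj.mp (by rw [hx]; decide)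
    subst hxe
    decide
  by_cases hc20 : c = 'u'
  · subst hc20
    have hxe : "u" = x := String.toList_inj.mp (by rw [hx]; decide)
    subst hxe
    decide
  by_cases hc21 : c = 'v'
  · subst hc21
    have hxe : "v" = x := String.toList_inj.mp (by rw [hx]; decide)
    subst hxe
    decide
  by_cases hc22 : c = 'w'
  · subst hc22
    have hxe : "w" = x := String.toList_inj.mp (by rw [hx]; decide)
    subst hxe
    decide
  by_cases hc23 : c = 'x'
  · subst hc23
    have hxe : "x" = x := String.toList_inj.mp (by rw [hx]; decide)
    subst hxe
    decide
  by_cases hc24 : c = 'y'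
  · subst hc24
    have hxe : "y" = x := String.toList_inj.mp (by rw [hx]; decide)
    subst hxe
    decide
  by_cases hc25 : c = 'z'
  · subst hc25
    have hxe : "z" = x := String.toList_inj.mp (by rw [hx]; decide)
    subst hxe
    decide
  -- c is none of a..z: both sides are none
  have hn : ¬('a' ≤ c ∧ c ≤ 'z') := by
    rintro ⟨h1, h2⟩
    rw [Char.le_def, UInt32.le_iff_toNat_le] at h1 h2
    have h1' : 97 ≤ c.toNat := by simpa using h1
    have h2' : c.toNat ≤ 122 := by simpa using h2
    have e0 : c.toNat ≠ 97 := fun h => hc0 (by apply Char.ext; apply UInt32.toNat_inj.mp; simp at h ⊢; omega)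
    have e1 : c.toNat ≠ 98 := fun h => hc1 (by apply Char.ext; apply UInt32.toNat_inj.mp; simp at h ⊢; omega)
    have e2 : c.toNat ≠ 99 := fun h => hc2 (by apply Char.ext; apply UInt32.toNat_inj.mp; simp at h ⊢; omega)
    have e3 : c.toNat ≠ 100 := fun h => hc3 (by apply Char.ext; apply UInt32.toNat_inj.mp; simp at h ⊢; omega)
    have e4 : c.toNat ≠ 101 := fun h => hc4 (by apply Char.ext; apply UInt32.toNat_inj.mp; simp at h ⊢; omega)
    have e5 : c.toNat ≠ 102 := fun h => hc5 (by apply Char.ext; apply UInt32.toNat_inj.mp; simp at h ⊢; omega)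
    have e6 : c.toNat ≠ 103 := fun h => hc6 (by apply Char.ext; apply UInt32.toNat_inj.mp; simp at h ⊢; omega)
    have e7 : c.toNat ≠ 104 := fun h => hc7 (by apply Char.ext; apply UInt32.toNat_inj.mp; simp at h ⊢; omega)
    have e8 : c.toNat ≠ 105 := fun h => hc8 (by apply Char.ext; apply UInt32.toNat_inj.mp; simp at h ⊢; omega)
    have e9 : c.toNat ≠ 106 := fun h => hc9 (by apply Char.ext; apply UInt32.toNat_inj.mp; simp at h ⊢; omega)
    have e10 : c.toNat ≠ 107 := fun h => hc10 (by apply Char.ext; apply UInt32.toNat_inj.mp; simp at h ⊢; omega)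
    have e11 : c.toNat ≠ 108 := fun h => hc11 (by apply Char.ext; apply UInt32.toNat_inj.mp; simp at h ⊢; omega)
    have e12 : c.toNat ≠ 109 := fun h => hc12 (by apply Char.ext; apply UInt32.toNat_inj.mp; simp at h ⊢; omega)
    have e13 : c.toNat ≠ 110 := fun h => hc13 (by apply Char.ext; apply UInt32.toNat_inj.mp; simp at h ⊢; omega)
    have e14 : c.toNat ≠ 111 := fun h => hc14 (by apply Char.ext; apply UInt32.toNat_inj.mp; simp at h ⊢; omega)
    have e15 : c.toNat ≠ 112 := fun h => hc15 (by apply Char.ext; apply UInt32.toNat_inj.mp; simp at h ⊢; omega)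
    have e16 : c.toNat ≠ 113 := fun h => hc16 (by apply Char.ext; apply UInt32.toNat_inj.mp; simp at h ⊢; omega)
    have e17 : c.toNat ≠ 114 := fun h => hc17 (by apply Char.ext; apply UInt32.toNat_inj.mp; simp at h ⊢; omega)
    have e18 : c.toNat ≠ 115 := fun h => hc18 (by apply Char.ext; apply UInt32.toNat_inj.mp; simp at h ⊢; omega)
    have e19 : c.toNat ≠ 116 := fun h => hc19 (by apply Char.ext; apply UInt32.toNat_inj.mp; simp at h ⊢; omega)
    have e20 : c.toNat ≠ 117 := fun h => hc20 (by apply Char.ext; apply UInt32.toNat_inj.mp; simp at h ⊢; omega)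
    have e21 : c.toNat ≠ 118 := fun h => hc21 (by apply Char.ext; apply UInt32.toNat_inj.mp; simp at h ⊢; omega)
    have e22 : c.toNat ≠ 119 := fun h => hc22 (by apply Char.ext; apply UInt32.toNat_inj.mp; simp at h ⊢; omega)
    have e23 : c.toNat ≠ 120 := fun h => hc23 (by apply Char.ext; apply UInt32.toNat_inj.mp; simp at h ⊢; omega)
    have e24 : c.toNat ≠ 121 := fun h => hc24 (by apply Char.ext; apply UInt32.toNat_inj.mp; simp at h ⊢; omega)
    have e25 : c.toNat ≠ 122 := fun h => hc25 (by apply Char.ext; apply UInt32.toNat_inj.mp; simp at h ⊢; omega)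
    omega
  simp only [pvData, pvScanA]
  rw [if_neg hn]
  rw [if_neg (fun he => hc0 (by rw [← he] at hx; simp at hx; exact hx.symm))]
  rw [if_neg (fun he => hc1 (by rw [← he] at hx; simp at hx; exact hx.symm))]
  rw [if_neg (fun he => hc2 (by rw [← he] at hx; simp at hx; exact hx.symm))]
  rw [if_neg (fun he => hc3 (by rw [← he] at hx; simp at hx; exact hx.symm))]
  rw [if_neg (fun he => hc4 (by rw [← he] at hx; simp at hx; exact hx.symm))]
  rw [if_neg (fun he => hc5 (by rw [← he] at hx; simp at hx; exact hx.symm))]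
  rw [if_neg (fun he => hc6 (by rw [← he] at hx; simp at hx; exact hx.symm))]
  rw [if_neg (fun he => hc7 (by rw [← he] at hx; simp at hx; exact hx.symm))]
  rw [if_neg (fun he => hc8 (by rw [← he] at hx; simp at hx; exact hx.symm))]
  rw [if_neg (fun he => hc9 (by rw [← he] at hx; simp at hx; exact hx.symm))]
  rw [if_neg (fun he => hc10 (by rw [← he] at hx; simp at hx; exact hx.symm))]
  rw [if_neg (fun he => hc11 (by rw [← he] at hx; simp at hx; exact hx.symm))]
  rw [if_neg (fun he => hc12 (by rw [← he] at hx; simp at hx; exact hx.symm))]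
  rw [if_neg (fun he => hc13 (by rw [← he] at hx; simp at hx; exact hx.symm))]
  rw [if_neg (fun he => hc14 (by rw [← he] at hx; simp at hx; exact hx.symm))]
  rw [if_neg (fun he => hc15 (by rw [← he] at hx; simp at hx; exact hx.symm))]
  rw [if_neg (fun he => hc16 (by rw [← he] at hx; simp at hx; exact hx.symm))]
  rw [if_neg (fun he => hc17 (by rw [← he] at hx; simp at hx; exact hx.symm))]
  rw [if_neg (fun he => hc18 (by rw [← he] at hx; simp at hx; exact hx.symm))]
  rw [if_neg (fun he => hc19 (by rw [← he] at hx; simp at hx; exact hx.symm))]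
  rw [if_neg (fun he => hc20 (by rw [← he] at hx; simp at hx; exact hx.symm))]
  rw [if_neg (fun he => hc21 (by rw [← he] at hx; simp at hx; exact hx.symm))]
  rw [if_neg (fun he => hc22 (by rw [← he] at hx; simp at hx; exact hx.symm))]
  rw [if_neg (fun he => hc23 (by rw [← he] at hx; simp at hx; exact hx.symm))]
  rw [if_neg (fun he => hc24 (by rw [← he] at hx; simp at hx; exact hx.symm))]
  rw [if_neg (fun he => hc25 (by rw [← he] at hx; simp at hx; exact hx.symm))]

theorem get_letter_index_spec : Claim_equal_get_letter_index := by
  intro x _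
  unfold Spec_get_letter_index get_letter_index get_letter_index_alt
  rw [PySem.Str.len_eq]
  match hx : x.toList with
  | [] => simp
  | [c] => simpa [hx] using pvScanA_single c x hx
  | a :: b :: rest => simp; omega
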